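-- pv_equiv track=rewrite | github.com/breivens/scriptingtalen | additional exercise series/series_06 [Python]/Chromosomal crossover.py | chromosomal_partial_sum
-- ===== SOURCE A (Python) =====
-- def chromosomal_partial_sum(sequence: list, crosses):
--     sum, seq = 0, list()
--     for item in sequence:
--         if item in crosses:
--             seq.append(sum)
--             seq.append(item)
--             sum = 0
--         else:
--             sum += item
--     seq.append(sum)
--     return seq
-- ===== SOURCE B (Python) =====
-- def chromosomal_partial_sum(sequence: list, crosses):
--     j = next((i for i, x in enumerate(sequence) if x in crosses), None)
--     if j is None:
--         return [sum(sequence)]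
--     return [sum(sequence[:j]), sequence[j]] + chromosomal_partial_sum(sequence[j + 1:], crosses)
-- ===== Notes on version B (the rewrite author's own statement) =====
-- stated objective: alternative
-- what changed: Replaced A's single-pass loop carrying a running-sum accumulator with a recursive decomposition: find the first crossover index, emit sum of the slice before it plus the crossover element, and recurse on the remaining slice.
import Mathlib
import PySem

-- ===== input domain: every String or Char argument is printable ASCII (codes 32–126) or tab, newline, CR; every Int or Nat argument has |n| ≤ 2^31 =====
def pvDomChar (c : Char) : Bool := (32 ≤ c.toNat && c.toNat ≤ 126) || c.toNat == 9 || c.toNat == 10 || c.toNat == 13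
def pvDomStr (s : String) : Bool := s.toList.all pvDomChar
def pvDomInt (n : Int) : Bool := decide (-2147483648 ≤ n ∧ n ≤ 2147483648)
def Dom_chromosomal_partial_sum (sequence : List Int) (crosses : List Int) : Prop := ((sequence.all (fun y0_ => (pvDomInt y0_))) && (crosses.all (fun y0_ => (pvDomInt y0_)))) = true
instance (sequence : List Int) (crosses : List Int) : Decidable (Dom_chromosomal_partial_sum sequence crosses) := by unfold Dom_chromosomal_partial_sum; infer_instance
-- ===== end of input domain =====

-- B recursively splits at the first crossover (slice sum + crossover, recurse on the rest)
-- instead of A's one-pass loop with a running accumulator; alternative decomposition, same cost.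

-- ===== PORT A =====
def chromosomal_partial_sum (sequence : List Int) (crosses : List Int) : List Int :=
  let st := sequence.foldl
    (fun (p : Int × List Int) item =>
      if crosses.contains item then (0, p.2 ++ [p.1, item])
      else (p.1 + item, p.2))
    (0, [])
  st.2 ++ [st.1]

-- ===== PORT B =====
def chromosomal_partial_sum_alt (sequence : List Int) (crosses : List Int) : List Int :=
  -- first crossover index scan = takeWhile/dropWhile split at the first element in crosses
  match h : sequence.dropWhile (fun x => !crosses.contains x) with
  | [] => [(sequence.takeWhile (fun x => !crosses.contains x)).sum]
  | c :: tl =>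
      (sequence.takeWhile (fun x => !crosses.contains x)).sum :: c ::
        chromosomal_partial_sum_alt tl crosses
termination_by sequence.length
decreasing_by
  have hle := List.length_dropWhile_le (fun x => !crosses.contains x) sequence
  rw [h] at hle
  simpa using Nat.lt_of_lt_of_le (Nat.lt_succ_self _) hle

-- ===== PRECONDITION & SPEC =====
def Spec_chromosomal_partial_sum (sequence : List Int) (crosses : List Int) (out : List Int) : Prop := out = chromosomal_partial_sum_alt sequence crosses
instance (sequence : List Int) (crosses : List Int) (out : List Int) : Decidable (Spec_chromosomal_partial_sum sequence crosses out) := by unfold Spec_chromosomal_partial_sum; infer_instance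

-- ===== CLAIM (what is proved, stated in full; the proofs are below) =====
def Claim_equal_chromosomal_partial_sum : Prop := ∀ (sequence : List Int) (crosses : List Int), Dom_chromosomal_partial_sum sequence crosses → Spec_chromosomal_partial_sum sequence crosses (chromosomal_partial_sum sequence crosses)

-- ===== LEMMAS AND PROOFS =====

-- add s to the head of the (always nonempty) result
def pvAddFirst (s : Int) : List Int → List Int
  | [] => [s]
  | h :: t => (s + h) :: t

lemma alt_cons_mem (crosses : List Int) (item : Int) (tl : List Int)
    (hc : crosses.contains item = true) :
    chromosomal_partial_sum_alt (item :: tl) crosses =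
      0 :: item :: chromosomal_partial_sum_alt tl crosses := by
  rw [chromosomal_partial_sum_alt]
  split <;> rename_i heq <;>
    simp_all [List.takeWhile_cons, List.contains_eq_mem]

lemma alt_cons_notmem (crosses : List Int) (item : Int) (tl : List Int)
    (hc : crosses.contains item = false) :
    chromosomal_partial_sum_alt (item :: tl) crosses =
      pvAddFirst item (chromosomal_partial_sum_alt tl crosses) := by
  have hp : (!crosses.contains item) = true := by rw [hc]; rfl
  rw [chromosomal_partial_sum_alt]
  split <;> rename_i heq <;>
      rw [List.dropWhile_cons, if_pos hp] at heq
  · conv_rhs => rw [chromosomal_partial_sum_alt]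
    split <;> rename_i heq2 <;> rw [heq] at heq2 <;>
      simp_all [pvAddFirst, List.contains_eq_mem]
  · conv_rhs => rw [chromosomal_partial_sum_alt]
    split <;> rename_i heq2 <;> rw [heq] at heq2 <;>
      simp_all [pvAddFirst, List.contains_eq_mem]

lemma alt_ne_nil (sequence crosses : List Int) :
    chromosomal_partial_sum_alt sequence crosses ≠ [] := by
  rw [chromosomal_partial_sum_alt]
  cases h : sequence.dropWhile (fun x => !crosses.contains x) <;> simp

lemma pvAddFirst_zero (l : List Int) (hl : l ≠ []) : pvAddFirst 0 l = l := by
  cases l with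
  | nil => exact absurd rfl hl
  | cons h t => simp [pvAddFirst]

lemma loop_eq (crosses : List Int) : ∀ (sequence : List Int) (s : Int) (acc : List Int),
    (sequence.foldl
      (fun (p : Int × List Int) item =>
        if crosses.contains item then (0, p.2 ++ [p.1, item])
        else (p.1 + item, p.2))
      (s, acc)).2 ++
      [(sequence.foldl
        (fun (p : Int × List Int) item =>
          if crosses.contains item then (0, p.2 ++ [p.1, item])
          else (p.1 + item, p.2))
        (s, acc)).1] =
    acc ++ pvAddFirst s (chromosomal_partial_sum_alt sequence crosses) := by
  intro sequence
  induction sequence with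
  | nil =>
      intro s acc
      rw [chromosomal_partial_sum_alt]
      simp [pvAddFirst]
  | cons item tl ih =>
      intro s acc
      by_cases hc : crosses.contains item = true
      · rw [alt_cons_mem crosses item tl hc]
        simp only [List.foldl_cons, hc, if_pos]
        rw [ih 0 (acc ++ [s, item])]
        rw [pvAddFirst_zero _ (alt_ne_nil tl crosses)]
        simp [pvAddFirst]
      · have hc' : crosses.contains item = false := by simpa using hc
        rw [alt_cons_notmem crosses item tl hc']
        simp only [List.foldl_cons, hc', if_neg, Bool.false_eq_true, not_false_iff]
        rw [ih (s + item) acc]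
        congr 1
        cases h : chromosomal_partial_sum_alt tl crosses with
        | nil => exact absurd h (alt_ne_nil tl crosses)
        | cons x xs => simp [pvAddFirst, add_assoc]

-- ===== VERDICT (by name: the statement is the Claim_ definition above) =====
theorem chromosomal_partial_sum_spec : Claim_equal_chromosomal_partial_sum := by
  intro sequence crosses _
  unfold Spec_chromosomal_partial_sum chromosomal_partial_sum
  have h := loop_eq crosses sequence 0 []
  simpa [pvAddFirst_zero _ (alt_ne_nil sequence crosses)] using h
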